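-- pv_equiv track=rewrite | github.com/Trnguyn/BTC- | Python/Hamming.py | generate_hamming_pos
-- ===== SOURCE A (Python) =====
-- def generate_hamming_pos(limit):
--     hamming = [1]
--     pos = {1: 1}
--
--     i2 = i3 = i5 = 0
--
--     while len(hamming) < limit:
--         next2 = hamming[i2] * 2
--         next3 = hamming[i3] * 3
--         next5 = hamming[i5] * 5
--
--         next_val = min(next2, next3, next5)
--
--         if next_val != hamming[-1]:
--             hamming.append(next_val)
--             pos[next_val] = len(hamming)  # vị trí 1-indexed
--
--         if next_val == next2:
--             i2 += 1
--         if next_val == next3: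
--             i3 += 1
--         if next_val == next5:
--             i5 += 1
--
--     return pos
-- ===== SOURCE B (Python) =====
-- def generate_hamming_pos(limit):
--     # Frontier (priority-queue) traversal: keep a sorted frontier of candidate
--     # values and a seen-set; repeatedly pop the smallest, record it, and push
--     # its 2x/3x/5x successors (if unseen) with a binary-search insertion.
--     # Builds the position dict at the end from the produced order.
--     n = max(1, limit)
--     heap = [1]
--     seen = {1}
--     order = []
--     while len(order) < n:
--         v = heap.pop(0)
--         order.append(v)
--         for m in (2, 3, 5):
--             nv = v * m
--             if nv not in seen:
--                 seen.add(nv)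
--                 lo, hi = 0, len(heap)
--                 while lo < hi:
--                     mid = (lo + hi) // 2
--                     if heap[mid] < nv:
--                         lo = mid + 1
--                     else:
--                         hi = mid
--                 heap.insert(lo, nv)
--     return {v: i + 1 for i, v in enumerate(order)}
-- ===== Notes on version B (the rewrite author's own statement) =====
-- stated objective: alternative
-- what changed: Replaces the three-pointer min-of-three scan over the growing list by a priority-queue traversal: a sorted frontier of candidates plus a seen set, popping the minimum and pushing its 2x/3x/5x successors via binary-search insertion, with the position dict built once at the end from the produced order.
import Mathlib
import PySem

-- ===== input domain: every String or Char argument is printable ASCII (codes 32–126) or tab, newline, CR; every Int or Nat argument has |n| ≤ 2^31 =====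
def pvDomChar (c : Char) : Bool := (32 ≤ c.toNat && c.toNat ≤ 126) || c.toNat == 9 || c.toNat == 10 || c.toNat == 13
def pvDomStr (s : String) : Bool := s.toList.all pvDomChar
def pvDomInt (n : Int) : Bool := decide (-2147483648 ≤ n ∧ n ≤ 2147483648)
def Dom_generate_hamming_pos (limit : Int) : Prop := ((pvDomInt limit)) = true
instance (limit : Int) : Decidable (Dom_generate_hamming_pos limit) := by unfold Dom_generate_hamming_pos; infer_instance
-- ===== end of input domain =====

-- B replaces A's three-pointer min-of-three scan by a sorted-frontier (priority-queue)
-- traversal with a seen set, building the position dict from the produced order at the end.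


-- ===== PORT A =====
-- the while loop of A; fuel makes the recursion total (the loop appends one number per
-- iteration, so `limit.toNat` fuel is never exhausted); the `none` arms of the index
-- matches are unreachable (the three pointers stay in range)
def aLoop (limit : Int) (fuel : Nat) (hamming : List Int) (i2 i3 i5 : Int)
    (pos : PySem.Dict Int Int) : PySem.Dict Int Int :=
  match fuel with
  | 0 => pos
  | fuel + 1 =>
    if (hamming.length : Int) < limit then
      match PySem.List.pyGet? hamming i2, PySem.List.pyGet? hamming i3,
            PySem.List.pyGet? hamming i5, PySem.List.pyGet? hamming (-1) with
      | some h2, some h3, some h5, some last =>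
        let next2 := h2 * 2
        let next3 := h3 * 3
        let next5 := h5 * 5
        let next_val := min (min next2 next3) next5
        let hp := if next_val ≠ last
          then (hamming ++ [next_val], pos.insert next_val ((hamming ++ [next_val]).length : Int))
          else (hamming, pos)
        let i2' := if next_val = next2 then i2 + 1 else i2
        let i3' := if next_val = next3 then i3 + 1 else i3
        let i5' := if next_val = next5 then i5 + 1 else i5
        aLoop limit fuel hp.1 i2' i3' i5' hp.2
      | _, _, _, _ => pos
    else pos

def generate_hamming_pos (limit : Int) : List (Int × Int) :=
  (aLoop limit limit.toNat [1] 0 0 0 (PySem.Dict.empty.insert 1 1)).items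

-- ===== PORT B =====
-- `lo, hi = 0, len(heap); while lo < hi: mid = (lo+hi)//2; …`
-- (lo, hi, mid stay nonnegative, so Nat arithmetic is exact; heap[mid] is always
-- in range, so the getD guard is never the default)
-- (the fuel `hi - lo` only makes the recursion structural; the loop always
-- terminates within that many iterations)
def bisectGo (heap : List Int) (nv : Int) : Nat → Nat → Nat → Nat
  | 0, lo, _ => lo
  | fuel + 1, lo, hi =>
    if lo < hi then
      let mid := (lo + hi) / 2
      if heap.getD mid 0 < nv then bisectGo heap nv fuel (mid + 1) hi
      else bisectGo heap nv fuel lo mid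
    else lo

def bisect (heap : List Int) (nv : Int) (lo hi : Nat) : Nat :=
  bisectGo heap nv (hi - lo) lo hi

-- `heap.insert(lo, nv)`
def bPush (heap : List Int) (nv : Int) : List Int :=
  PySem.List.insert heap ((bisect heap nv 0 heap.length : Nat) : Int) nv

-- one iteration of `for m in (2, 3, 5): …`
def bStep (v : Int) (hs : List Int × PySem.Set Int) (m : Int) : List Int × PySem.Set Int :=
  let nv := v * m
  if PySem.Set.contains hs.2 nv then hs
  else (bPush hs.1 nv, PySem.Set.add hs.2 nv)

-- the while loop of B; fuel makes the recursion total (one pop per iteration, so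
-- `n.toNat` fuel is never exhausted); the `[]` arm is unreachable (frontier nonempty)
def bLoop (n : Int) (fuel : Nat) (heap : List Int) (seen : PySem.Set Int)
    (order : List Int) : List Int :=
  match fuel with
  | 0 => order
  | fuel + 1 =>
    if (order.length : Int) < n then
      match heap with
      | [] => order
      | v :: rest =>
        let hs := [(2 : Int), 3, 5].foldl (bStep v) (rest, seen)
        bLoop n fuel hs.1 hs.2 (order ++ [v])
    else order

def generate_hamming_pos_alt (limit : Int) : List (Int × Int) :=
  let n := max 1 limit
  let order := bLoop n n.toNat [1] (PySem.Set.ofList [1]) []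
  ((PySem.List.enumerate order 0).foldl
    (fun d p => d.insert p.2 (p.1 + 1)) PySem.Dict.empty).items

-- ===== PRECONDITION & SPEC =====
def Spec_generate_hamming_pos (limit : Int) (out : List (Int × Int)) : Prop := out = generate_hamming_pos_alt limit
instance (limit : Int) (out : List (Int × Int)) : Decidable (Spec_generate_hamming_pos limit out) := by unfold Spec_generate_hamming_pos; infer_instance

-- ===== CLAIM (what is proved, stated in full; the proofs are below) =====
def Claim_equal_generate_hamming_pos : Prop := ∀ (limit : Int), Dom_generate_hamming_pos limit → Spec_generate_hamming_pos limit (generate_hamming_pos limit)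
-- ===== LEMMAS AND PROOFS =====

-- the association list [(L[0], k), (L[1], k+1), …]
def pairs (k : Int) : List Int → List (Int × Int)
  | [] => []
  | v :: t => (v, k) :: pairs (k + 1) t

theorem pairs_append (L : List Int) (k v : Int) :
    pairs k (L ++ [v]) = pairs k L ++ [(v, k + L.length)] := by
  induction L generalizing k with
  | nil => simp [pairs]
  | cons a t ih => simp [pairs, ih]; omega

theorem pairs_fst (L : List Int) (k : Int) : (pairs k L).map (·.1) = L := by
  induction L generalizing k with
  | nil => rfl
  | cons a t ih => simp [pairs, ih]

theorem enumerate_map_pairs (L : List Int) (s : Int) :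
    (PySem.List.enumerate L s).map (fun a => (a.2, a.1 + 1)) = pairs (s + 1) L := by
  induction L generalizing s with
  | nil => simp [pairs, PySem.List.enumerate_nil]
  | cons a t ih => rw [PySem.List.enumerate_cons, List.map_cons, ih]; rfl

theorem lastD_mem (L : List Int) (h : L ≠ []) : L.getLastD 0 ∈ L := by
  rw [List.getLastD_eq_getLast?, List.getLast?_eq_some_getLast h]
  simpa using List.getLast_mem h

theorem le_lastD (L : List Int) (hs : L.Pairwise (· < ·)) (x : Int) (hx : x ∈ L) :
    x ≤ L.getLastD 0 := by
  induction L with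
  | nil => simp at hx
  | cons a t ih =>
    rcases List.pairwise_cons.mp hs with ⟨ha, ht⟩
    cases t with
    | nil => simp at hx; simp [hx]
    | cons b u =>
      have hlast : (a :: b :: u).getLastD 0 = (b :: u).getLastD 0 := rfl
      rw [hlast]
      rcases List.mem_cons.mp hx with rfl | hx'
      · exact le_of_lt (ha _ (lastD_mem (b :: u) (by simp)))
      · exact ih ht hx'

-- the linear description of the binary-search insertion position
def pushPos (nv : Int) : List Int → Nat
  | [] => 0
  | h :: t => if h < nv then pushPos nv t + 1 else 0

-- the structural description of `heap.insert(lo, nv)` at that position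
def linIns (nv : Int) : List Int → List Int
  | [] => [nv]
  | h :: t => if h < nv then h :: linIns nv t else nv :: h :: t

theorem pushPos_le (nv : Int) (t : List Int) : pushPos nv t ≤ t.length := by
  induction t with
  | nil => simp [pushPos]
  | cons a u ih => simp only [pushPos]; split <;> simp <;> omega

theorem getD_mem' (L : List Int) (k : Nat) (h : k < L.length) : L.getD k 0 ∈ L := by
  rw [List.getD_eq_getElem L 0 h]; exact List.getElem_mem h

theorem pushPos_lt (heap : List Int) (nv : Int) :
    ∀ j < pushPos nv heap, heap.getD j 0 < nv := by
  induction heap with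
  | nil => intro j hj; simp [pushPos] at hj
  | cons a t ih =>
    simp only [pushPos]
    split
    · intro j hj
      cases j with
      | zero => simpa
      | succ j' => simpa using ih j' (by omega)
    · intro j hj; omega
  
theorem pushPos_ge (heap : List Int) (nv : Int) (hs : heap.Pairwise (· < ·)) :
    ∀ j, pushPos nv heap ≤ j → j < heap.length → ¬ heap.getD j 0 < nv := by
  induction heap with
  | nil => intro j _ hj; simp at hj
  | cons a t ih =>
    obtain ⟨ha, ht⟩ := List.pairwise_cons.mp hs
    simp only [pushPos]
    split
    · intro j hj hlen
      obtain ⟨j', rfl⟩ : ∃ j', j = j' + 1 := ⟨j - 1, by omega⟩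
      simpa using ih ht j' (by omega) (by simpa using hlen)
    · intro j hj hlen
      cases j with
      | zero => simp only [List.getD_cons_zero]; omega
      | succ j' =>
        have hmem := ha _ (getD_mem' t j' (by simpa using hlen))
        simp only [List.getD_cons_succ]
        omega

theorem bisectGo_eq (heap : List Int) (nv : Int) (hs : heap.Pairwise (· < ·)) :
    ∀ (fuel lo hi : Nat), hi - lo ≤ fuel → lo ≤ pushPos nv heap → pushPos nv heap ≤ hi →
      hi ≤ heap.length → bisectGo heap nv fuel lo hi = pushPos nv heap := by
  intro fuel
  induction fuel with
  | zero => intro lo hi hn hlo hhi _; simp only [bisectGo]; omega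
  | succ fuel ih =>
    intro lo hi hn hlo hhi hlen
    simp only [bisectGo]
    by_cases hlh : lo < hi
    · rw [if_pos hlh]
      by_cases hc : heap.getD ((lo + hi) / 2) 0 < nv
      · rw [if_pos hc]
        have hmidP : (lo + hi) / 2 < pushPos nv heap := by
          by_contra hle
          exact pushPos_ge heap nv hs ((lo + hi) / 2) (by omega) (by omega) hc
        exact ih _ _ (by omega) (by omega) hhi hlen
      · rw [if_neg hc]
        have hPmid : pushPos nv heap ≤ (lo + hi) / 2 := by
          by_contra hgt
          exact hc (pushPos_lt heap nv ((lo + hi) / 2) (by omega))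
        exact ih _ _ (by omega) hlo hPmid (by omega)
    · rw [if_neg hlh]; omega

theorem bisect_eq (heap : List Int) (nv : Int) (hs : heap.Pairwise (· < ·)) :
    ∀ (n lo hi : Nat), hi - lo = n → lo ≤ pushPos nv heap → pushPos nv heap ≤ hi →
      hi ≤ heap.length → bisect heap nv lo hi = pushPos nv heap := by
  intro n lo hi _ hlo hhi hlen
  exact bisectGo_eq heap nv hs (hi - lo) lo hi le_rfl hlo hhi hlen

theorem insert_pushPos (heap : List Int) (nv : Int) :
    PySem.List.insert heap ((pushPos nv heap : Nat) : Int) nv = linIns nv heap := by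
  induction heap with
  | nil =>
    rw [PySem.List.insert_natCast _ _ _ (by simp [pushPos])]
    simp [pushPos, linIns]
  | cons h t ih =>
    simp only [pushPos, linIns]
    split
    · rw [PySem.List.insert_natCast _ (pushPos nv t + 1) _ (by simpa using pushPos_le nv t),
          ← ih, PySem.List.insert_natCast _ (pushPos nv t) _ (pushPos_le nv t)]
      simp
    · rw [PySem.List.insert_natCast _ 0 _ (by simp)]
      simp

theorem bPush_eq_linIns (heap : List Int) (nv : Int) (hs : heap.Pairwise (· < ·)) :
    bPush heap nv = linIns nv heap := by
  unfold bPush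
  rw [bisect_eq heap nv hs (heap.length - 0) 0 heap.length rfl (by omega)
      (pushPos_le nv heap) le_rfl, insert_pushPos]

theorem mem_linIns (H : List Int) (nv x : Int) : x ∈ linIns nv H ↔ x = nv ∨ x ∈ H := by
  induction H with
  | nil => simp [linIns]
  | cons a t ih => simp only [linIns]; split <;> simp [ih] <;> tauto

theorem mem_bPush (H : List Int) (hs : H.Pairwise (· < ·)) (nv x : Int) :
    x ∈ bPush H nv ↔ x = nv ∨ x ∈ H := by
  rw [bPush_eq_linIns H nv hs]; exact mem_linIns H nv x

theorem sorted_linIns (H : List Int) (nv : Int) (hs : H.Pairwise (· < ·)) (hn : nv ∉ H) :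
    (linIns nv H).Pairwise (· < ·) := by
  induction H with
  | nil => simp [linIns]
  | cons a t ih =>
    rcases List.pairwise_cons.mp hs with ⟨ha, ht⟩
    simp only [linIns]
    split
    · refine List.pairwise_cons.mpr ⟨?_, ih ht (by simp_all)⟩
      intro y hy
      rcases (mem_linIns t nv y).mp hy with rfl | hy
      · assumption
      · exact ha y hy
    · have hna : nv ≠ a := by intro e; exact hn (e ▸ List.mem_cons_self)
      refine List.pairwise_cons.mpr ⟨?_, hs⟩
      intro y hy
      rcases List.mem_cons.mp hy with rfl | hy'
      · omega
      · exact lt_trans (by omega) (ha y hy')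

theorem sorted_bPush (H : List Int) (nv : Int) (hs : H.Pairwise (· < ·)) (hn : nv ∉ H) :
    (bPush H nv).Pairwise (· < ·) := by
  rw [bPush_eq_linIns H nv hs]; exact sorted_linIns H nv hs hn

theorem stepOne (v m : Int) (H : List Int) (S : PySem.Set Int)
    (hv : 1 ≤ v) (hm : 2 ≤ m)
    (hs : H.Pairwise (· < ·)) (hsub : ∀ x ∈ H, x ∈ S) (hgt : ∀ x ∈ H, v < x) :
    (bStep v (H, S) m).1.Pairwise (· < ·) ∧
    (∀ x ∈ (bStep v (H, S) m).1, x ∈ (bStep v (H, S) m).2) ∧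
    (∀ x ∈ (bStep v (H, S) m).1, v < x) ∧
    (∀ x, x ∈ (bStep v (H, S) m).1 ↔ x ∈ H ∨ (x = v * m ∧ v * m ∉ S)) ∧
    (∀ x, x ∈ (bStep v (H, S) m).2 ↔ x ∈ S ∨ x = v * m) := by
  have hvm : v < v * m := by nlinarith
  unfold bStep
  by_cases hc : v * m ∈ S
  · have hcc : PySem.Set.contains S (v * m) = true := by
      rw [PySem.Set.contains_iff]; exact hc
    simp only [hcc, if_true]
    refine ⟨hs, hsub, hgt, ?_, ?_⟩
    · intro x; constructor
      · intro h; exact Or.inl h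
      · rintro (h | ⟨rfl, h⟩)
        · exact h
        · exact absurd hc h
    · intro x; constructor
      · intro h; exact Or.inl h
      · rintro (h | rfl)
        · exact h
        · exact hc
  · have hcc : PySem.Set.contains S (v * m) = false := by
      rw [← Bool.not_eq_true, PySem.Set.contains_iff]; exact hc
    simp only [hcc, Bool.false_eq_true, if_false]
    have hnH : v * m ∉ H := fun h => hc (hsub _ h)
    refine ⟨sorted_bPush H (v * m) hs hnH, ?_, ?_, ?_, ?_⟩
    · intro x hx
      rcases (mem_bPush H hs (v * m) x).mp hx with rfl | hx'
      · rw [PySem.Set.mem_add]; exact Or.inr rfl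
      · rw [PySem.Set.mem_add]; exact Or.inl (hsub x hx')
    · intro x hx
      rcases (mem_bPush H hs (v * m) x).mp hx with rfl | hx'
      · exact hvm
      · exact hgt x hx'
    · intro x
      rw [mem_bPush H hs]; tauto
    · intro x
      simp [PySem.Set.mem_add]

theorem fold3 (v : Int) (rest : List Int) (seen : PySem.Set Int)
    (hv : 1 ≤ v) (hs : rest.Pairwise (· < ·)) (hsub : ∀ x ∈ rest, x ∈ seen)
    (hgt : ∀ x ∈ rest, v < x) :
    ([(2 : Int), 3, 5].foldl (bStep v) (rest, seen)).1.Pairwise (· < ·) ∧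
    (∀ x ∈ ([(2 : Int), 3, 5].foldl (bStep v) (rest, seen)).1, v < x) ∧
    (∀ x, x ∈ ([(2 : Int), 3, 5].foldl (bStep v) (rest, seen)).1 ↔
      x ∈ rest ∨ ((x = v * 2 ∨ x = v * 3 ∨ x = v * 5) ∧ x ∉ seen)) ∧
    (∀ x, x ∈ ([(2 : Int), 3, 5].foldl (bStep v) (rest, seen)).2 ↔
      x ∈ seen ∨ x = v * 2 ∨ x = v * 3 ∨ x = v * 5) := by
  have hne23 : v * 3 ≠ v * 2 := by omega
  have hne52 : v * 5 ≠ v * 2 := by omega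
  have hne53 : v * 5 ≠ v * 3 := by omega
  have hfold : [(2 : Int), 3, 5].foldl (bStep v) (rest, seen)
      = bStep v (bStep v (bStep v (rest, seen) 2) 3) 5 := rfl
  obtain ⟨s1, b1, g1, m1, n1⟩ := stepOne v 2 rest seen hv (by norm_num) hs hsub hgt
  set t1 := bStep v (rest, seen) 2 with ht1
  obtain ⟨s2, b2, g2, m2, n2⟩ := stepOne v 3 t1.1 t1.2 hv (by norm_num) s1 b1 g1
  rw [Prod.mk.eta] at s2 b2 g2 m2 n2
  set t2 := bStep v t1 3 with ht2
  obtain ⟨s3, b3, g3, m3, n3⟩ := stepOne v 5 t2.1 t2.2 hv (by norm_num) s2 b2 g2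
  rw [Prod.mk.eta] at s3 b3 g3 m3 n3
  rw [hfold]
  refine ⟨s3, g3, ?_, ?_⟩
  · intro x
    simp only [m3, m2, m1, n2, n1]
    constructor
    · rintro (((h | ⟨rfl, hn⟩) | ⟨rfl, hn⟩) | ⟨rfl, hn⟩)
      · exact Or.inl h
      · exact Or.inr ⟨Or.inl rfl, hn⟩
      · exact Or.inr ⟨Or.inr (Or.inl rfl), fun hm => hn (Or.inl hm)⟩
      · exact Or.inr ⟨Or.inr (Or.inr rfl), fun hm => hn (Or.inl (Or.inl hm))⟩
    · rintro (h | ⟨(rfl | rfl | rfl), hn⟩)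
      · exact Or.inl (Or.inl (Or.inl h))
      · exact Or.inl (Or.inl (Or.inr ⟨rfl, hn⟩))
      · exact Or.inl (Or.inr ⟨rfl, fun hc => hc.elim hn (fun e => hne23 e)⟩)
      · exact Or.inr ⟨rfl, fun hc => hc.elim (fun hc' => hc'.elim hn hne52) hne53⟩
  · intro x
    simp only [n3, n2, n1]
    tauto

def Mult (L : List Int) (x : Int) : Prop := ∃ u ∈ L, x = u * 2 ∨ x = u * 3 ∨ x = u * 5

def ptrInv (m : Int) (L : List Int) (k : Nat) : Prop :=
  k < L.length ∧ L.getLastD 0 < L.getD k 0 * m ∧ ∀ j < k, L.getD j 0 * m ∈ L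

-- joint invariant tying A's state (L, three pointers) to B's state (frontier, seen set)
def JInv (L : List Int) (k2 k3 k5 : Nat) (heap seen : List Int) : Prop :=
  L ≠ [] ∧ L.Pairwise (· < ·) ∧ (∀ x ∈ L, 1 ≤ x) ∧ (∀ x ∈ L, x = 1 ∨ Mult L x) ∧
  ptrInv 2 L k2 ∧ ptrInv 3 L k3 ∧ ptrInv 5 L k5 ∧
  heap.Pairwise (· < ·) ∧
  (∀ x, x ∈ heap ↔ Mult L x ∧ x ∉ L) ∧
  (∀ x, x ∈ seen ↔ x = 1 ∨ Mult L x)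

theorem Mult_mono (L : List Int) (v x : Int) (h : Mult L x) : Mult (L ++ [v]) x := by
  obtain ⟨u, hu, hc⟩ := h; exact ⟨u, by simp [hu], hc⟩

theorem Mult_append (L : List Int) (v x : Int) :
    Mult (L ++ [v]) x ↔ Mult L x ∨ x = v * 2 ∨ x = v * 3 ∨ x = v * 5 := by
  simp only [Mult, List.mem_append, List.mem_singleton]
  constructor
  · rintro ⟨u, hu | rfl, hc⟩
    · exact Or.inl ⟨u, hu, hc⟩
    · tauto
  · rintro (⟨u, hu, hc⟩ | h)
    · exact ⟨u, Or.inl hu, hc⟩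
    · exact ⟨v, Or.inr rfl, h⟩

theorem sorted_getD_lt (L : List Int) (hs : L.Pairwise (· < ·)) (i j : Nat)
    (hij : i < j) (hj : j < L.length) : L.getD i 0 < L.getD j 0 := by
  rw [List.getD_eq_getElem L 0 (by omega), List.getD_eq_getElem L 0 hj]
  exact List.pairwise_iff_getElem.mp hs i j (by omega) hj hij

theorem getD_app_lt (L M : List Int) (j : Nat) (h : j < L.length) :
    (L ++ M).getD j 0 = L.getD j 0 := by
  rw [List.getD_eq_getElem _ _ (by simp; omega), List.getD_eq_getElem _ _ h]
  exact List.getElem_append_left h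

theorem getD_app_len (L : List Int) (w : Int) : (L ++ [w]).getD L.length 0 = w := by
  simp [List.getD]

theorem bLoop_stop (n : Int) (fb : Nat) (heap : List Int) (seen : PySem.Set Int)
    (order : List Int) (h : ¬ (order.length : Int) < n) :
    bLoop n fb heap seen order = order := by
  cases fb with
  | zero => rfl
  | succ fb =>
    have e : bLoop n (fb + 1) heap seen order
        = if (order.length : Int) < n then
            (match heap with
             | [] => order
             | v :: rest =>
               bLoop n fb ([(2 : Int), 3, 5].foldl (bStep v) (rest, seen)).1
                 ([(2 : Int), 3, 5].foldl (bStep v) (rest, seen)).2 (order ++ [v]))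
          else order := rfl
    rw [e, if_neg h]

theorem dictOf_items (order : List Int) (hnd : order.Nodup) :
    ((PySem.List.enumerate order 0).foldl
      (fun d p => d.insert p.2 (p.1 + 1)) PySem.Dict.empty).items = pairs 1 order := by
  have h := PySem.Dict.items_foldl_insert_fresh (PySem.List.enumerate order 0)
      (fun p => p.2) (fun p => p.1 + 1) PySem.Dict.empty
      (fun a _ => PySem.Dict.contains_empty _) (by rw [PySem.List.map_snd_enumerate]; exact hnd)
  have e := enumerate_map_pairs order 0
  norm_num at e
  rw [show ((PySem.List.enumerate order 0).foldl
        (fun d p => d.insert p.2 (p.1 + 1)) PySem.Dict.empty).items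
      = PySem.Dict.empty.items ++ (PySem.List.enumerate order 0).map
          (fun a => ((fun p : Int × Int => p.2) a, (fun p : Int × Int => p.1 + 1) a)) from h]
  simpa using e

theorem mainSim (fa : Nat) : ∀ (fb : Nat) (limit : Int) (L : List Int) (k2 k3 k5 : Nat)
    (heap : List Int) (seen : PySem.Set Int) (pos : PySem.Dict Int Int),
    JInv L k2 k3 k5 heap seen →
    pos.items = pairs 1 L →
    limit ≤ (L.length : Int) + fa →
    limit ≤ (L.length : Int) + fb →
    (aLoop limit fa L k2 k3 k5 pos).items = pairs 1 (bLoop limit fb heap seen L) ∧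
    (bLoop limit fb heap seen L).Pairwise (· < ·) := by
  induction fa with
  | zero =>
    intro fb limit L k2 k3 k5 heap seen pos hInv hpos hfa hfb
    rw [bLoop_stop _ _ _ _ _ (by omega)]
    exact ⟨hpos, hInv.2.1⟩
  | succ fa ih =>
    intro fb limit L k2 k3 k5 heap seen pos hInv hpos hfa hfb
    obtain ⟨hne, hsort, hone, hself, ⟨hk2, hb2, hc2⟩, ⟨hk3, hb3, hc3⟩, ⟨hk5, hb5, hc5⟩,
      hhs, hhm, hsm⟩ := hInv
    by_cases hg : (L.length : Int) < limit
    case neg =>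
      rw [bLoop_stop _ _ _ _ _ hg]
      constructor
      · rw [aLoop, if_neg hg]; exact hpos
      · exact hsort
    case pos =>
    set last := L.getLastD 0 with hlastdef
    set c2 := L.getD k2 0 * 2 with hc2def
    set c3 := L.getD k3 0 * 3 with hc3def
    set c5 := L.getD k5 0 * 5 with hc5def
    set v := min (min c2 c3) c5 with hvdef
    have hlast1 : 1 ≤ last := hone _ (lastD_mem L hne)
    have hvgt : last < v := by omega
    have hv1 : 1 ≤ v := by omega
    have hvle2 : v ≤ c2 := by omega
    have hvle3 : v ≤ c3 := by omega
    have hvle5 : v ≤ c5 := by omega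
    have hvchoice : v = c2 ∨ v = c3 ∨ v = c5 := by omega
    have hLlt : ∀ x ∈ L, x < v := fun x hx => by
      have := le_lastD L hsort x hx; omega
    have hvnotL : v ∉ L := fun h => by have := hLlt v h; omega
    have hvmult : Mult L v := by
      rcases hvchoice with h | h | h
      · exact ⟨_, getD_mem' L k2 hk2, Or.inl h⟩
      · exact ⟨_, getD_mem' L k3 hk3, Or.inr (Or.inl h)⟩
      · exact ⟨_, getD_mem' L k5 hk5, Or.inr (Or.inr h)⟩
    have hvheap : v ∈ heap := (hhm v).mpr ⟨hvmult, hvnotL⟩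
    have hmin : ∀ x ∈ heap, v ≤ x := by
      intro x hx
      obtain ⟨⟨u, huL, hcase⟩, hnx⟩ := (hhm x).mp hx
      obtain ⟨j, hj, rfl⟩ : ∃ (j : Nat) (hj : j < L.length), u = L.getD j 0 := by
        obtain ⟨j, hj, rfl⟩ := List.mem_iff_getElem.mp huL
        exact ⟨j, hj, (List.getD_eq_getElem L 0 hj).symm⟩
      rcases hcase with rfl | rfl | rfl
      · by_cases hjk : j < k2
        · exact absurd (hc2 j hjk) hnx
        · have hLe : L.getD k2 0 ≤ L.getD j 0 := by
            rcases Nat.lt_or_ge k2 j with h' | h'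
            · exact le_of_lt (sorted_getD_lt L hsort k2 j h' hj)
            · have h'' : k2 = j := by omega
              rw [h'']
          omega
      · by_cases hjk : j < k3
        · exact absurd (hc3 j hjk) hnx
        · have hLe : L.getD k3 0 ≤ L.getD j 0 := by
            rcases Nat.lt_or_ge k3 j with h' | h'
            · exact le_of_lt (sorted_getD_lt L hsort k3 j h' hj)
            · have h'' : k3 = j := by omega
              rw [h'']
          omega
      · by_cases hjk : j < k5
        · exact absurd (hc5 j hjk) hnx
        · have hLe : L.getD k5 0 ≤ L.getD j 0 := by
            rcases Nat.lt_or_ge k5 j with h' | h'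
            · exact le_of_lt (sorted_getD_lt L hsort k5 j h' hj)
            · have h'' : k5 = j := by omega
              rw [h'']
          omega
    obtain ⟨rest, rfl⟩ : ∃ rest, heap = v :: rest := by
      cases heapE : heap with
      | nil => rw [heapE] at hvheap; simp at hvheap
      | cons h t =>
        refine ⟨t, ?_⟩
        have h1 : v ≤ h := hmin h (by rw [heapE]; exact List.mem_cons_self)
        rw [heapE] at hvheap
        rcases List.mem_cons.mp hvheap with rfl | hv'
        · rfl
        · have := (List.pairwise_cons.mp (heapE ▸ hhs)).1 v hv'; omega
    obtain ⟨hvr, hrs⟩ := List.pairwise_cons.mp hhs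
    have hsubr : ∀ x ∈ rest, x ∈ seen := fun x hx =>
      (hsm x).mpr (Or.inr ((hhm x).mp (List.mem_cons_of_mem _ hx)).1)
    obtain ⟨f1, f2, f3, f4⟩ := fold3 v rest seen hv1 hrs hsubr hvr
    obtain ⟨fb', rfl⟩ : ∃ fb', fb = fb' + 1 := ⟨fb - 1, by omega⟩
    set k2' : Nat := if v = c2 then k2 + 1 else k2 with hk2'def
    set k3' : Nat := if v = c3 then k3 + 1 else k3 with hk3'def
    set k5' : Nat := if v = c5 then k5 + 1 else k5 with hk5'def
    set hp := [(2 : Int), 3, 5].foldl (bStep v) (rest, seen) with hhpdef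
    -- one step of A
    have hg2 : PySem.List.pyGet? L ((k2 : Nat) : Int) = some (L.getD k2 0) := by
      rw [PySem.List.pyGet?_natCast, List.getElem?_eq_getElem hk2, List.getD_eq_getElem L 0 hk2]
    have hg3 : PySem.List.pyGet? L ((k3 : Nat) : Int) = some (L.getD k3 0) := by
      rw [PySem.List.pyGet?_natCast, List.getElem?_eq_getElem hk3, List.getD_eq_getElem L 0 hk3]
    have hg5 : PySem.List.pyGet? L ((k5 : Nat) : Int) = some (L.getD k5 0) := by
      rw [PySem.List.pyGet?_natCast, List.getElem?_eq_getElem hk5, List.getD_eq_getElem L 0 hk5]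
    have hgl : PySem.List.pyGet? L (-1) = some last := by
      rw [PySem.List.pyGet?_neg_one L, List.getLast?_eq_some_getLast hne]
      congr 1
      rw [hlastdef, List.getLastD_eq_getLast?, List.getLast?_eq_some_getLast hne]
      rfl
    have hA : aLoop limit (fa + 1) L (k2 : Int) (k3 : Int) (k5 : Int) pos
        = aLoop limit fa (L ++ [v]) (k2' : Int) (k3' : Int) (k5' : Int)
            (pos.insert v (((L ++ [v]).length : Nat) : Int)) := by
      rw [aLoop, if_pos hg, hg2, hg3, hg5, hgl]
      dsimp only
      rw [if_pos (show v ≠ last by omega)]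
      congr 1
      · rw [hk2'def]; split <;> push_cast <;> ring
      · rw [hk3'def]; split <;> push_cast <;> ring
      · rw [hk5'def]; split <;> push_cast <;> ring
    -- one step of B
    have hB : bLoop limit (fb' + 1) (v :: rest) seen L = bLoop limit fb' hp.1 hp.2 (L ++ [v]) := by
      have e : bLoop limit (fb' + 1) (v :: rest) seen L
          = if (L.length : Int) < limit then
              bLoop limit fb' ([(2 : Int), 3, 5].foldl (bStep v) (rest, seen)).1
                ([(2 : Int), 3, 5].foldl (bStep v) (rest, seen)).2 (L ++ [v])
            else L := rfl
      rw [e, if_pos hg]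
    rw [hA, hB]
    -- the new joint invariant
    have hLlast : (L ++ [v]).getLastD 0 = v := by simp
    have hsort' : (L ++ [v]).Pairwise (· < ·) := by
      rw [List.pairwise_append]
      exact ⟨hsort, by simp, fun x hx y hy => by simp at hy; subst hy; exact hLlt x hx⟩
    have hptr : ∀ (m : Int) (k : Nat), 2 ≤ m → (L.getD k 0 * m = c2 ∨ L.getD k 0 * m = c3 ∨ L.getD k 0 * m = c5) →
        k < L.length → last < L.getD k 0 * m → (∀ j < k, L.getD j 0 * m ∈ L) → v ≤ L.getD k 0 * m →
        ptrInv m (L ++ [v]) (if v = L.getD k 0 * m then k + 1 else k) := by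
      intro m k hm _ hk hb hc hle
      split
      case isTrue hveq =>
        refine ⟨by simp; omega, ?_, ?_⟩
        · rw [hLlast]
          rcases Nat.lt_or_ge (k + 1) L.length with hlt | hge
          · rw [getD_app_lt _ _ _ hlt]
            have hmono := sorted_getD_lt L hsort k (k + 1) (by omega) hlt
            have : L.getD k 0 * m < L.getD (k + 1) 0 * m := by
              have h1 : 1 ≤ L.getD k 0 := hone _ (getD_mem' L k hk)
              nlinarith
            omega
          · have hEq : k + 1 = L.length := by omega
            rw [hEq, getD_app_len]
            nlinarith
        · intro j hj
          rcases Nat.lt_or_ge j k with hjlt | hjge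
          · rw [getD_app_lt _ _ _ (by omega)]
            exact List.mem_append_left _ (hc j hjlt)
          · have : j = k := by omega
            subst this
            rw [getD_app_lt _ _ _ hk, ← hveq]
            exact List.mem_append_right _ (by simp)
      case isFalse hvne =>
        refine ⟨by simp; omega, ?_, ?_⟩
        · rw [hLlast, getD_app_lt _ _ _ hk]
          omega
        · intro j hj
          rw [getD_app_lt _ _ _ (by omega)]
          exact List.mem_append_left _ (hc j hj)
    have hInv' : JInv (L ++ [v]) k2' k3' k5' hp.1 hp.2 := by
      refine ⟨by simp, hsort', ?_, ?_, ?_, ?_, ?_, f1, ?_, ?_⟩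
      · intro x hx
        rcases List.mem_append.mp hx with hx' | hx'
        · exact hone x hx'
        · simp at hx'; omega
      · intro x hx
        rcases List.mem_append.mp hx with hx' | hx'
        · rcases hself x hx' with h | h
          · exact Or.inl h
          · exact Or.inr (Mult_mono L v x h)
        · simp at hx'; subst hx'
          exact Or.inr (Mult_mono L v v hvmult)
      · exact hptr 2 k2 (by norm_num) (Or.inl rfl) hk2 hb2 hc2 hvle2
      · exact hptr 3 k3 (by norm_num) (Or.inr (Or.inl rfl)) hk3 hb3 hc3 hvle3
      · exact hptr 5 k5 (by norm_num) (Or.inr (Or.inr rfl)) hk5 hb5 hc5 hvle5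
      · -- frontier membership characterisation
        intro x
        rw [f3, Mult_append]
        constructor
        · rintro (hx | ⟨hx, hns⟩)
          · have hxv : v < x := hvr x hx
            obtain ⟨hmx, hnx⟩ := (hhm x).mp (List.mem_cons_of_mem _ hx)
            refine ⟨Or.inl hmx, ?_⟩
            intro hmem
            rcases List.mem_append.mp hmem with h | h
            · exact hnx h
            · simp at h; omega
          · constructor
            · tauto
            · intro hmem
              rcases List.mem_append.mp hmem with h | h
              · exact hns ((hsm x).mpr (Or.inr ((hself x h).resolve_left (by rcases hx with rfl | rfl | rfl <;> omega))))
              · simp at h; rcases hx with rfl | rfl | rfl <;> omega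
        · rintro ⟨hmx | hx, hnx⟩
          · have hxL : x ∉ L := fun h => hnx (List.mem_append_left _ h)
            have hxheap := (hhm x).mpr ⟨hmx, hxL⟩
            rcases List.mem_cons.mp hxheap with rfl | h
            · exact absurd (List.mem_append_right _ (by simp)) hnx
            · exact Or.inl h
          · by_cases hseen : x ∈ seen
            · rcases (hsm x).mp hseen with h1 | hmx
              · rcases hx with h | h | h <;> omega
              · have hxL : x ∉ L := fun h => hnx (List.mem_append_left _ h)
                have hxheap := (hhm x).mpr ⟨hmx, hxL⟩
                rcases List.mem_cons.mp hxheap with rfl | h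
                · exact absurd (List.mem_append_right _ (by simp)) hnx
                · exact Or.inl h
            · exact Or.inr ⟨hx, hseen⟩
      · -- seen characterisation
        intro x
        rw [f4, Mult_append]
        constructor
        · rintro (hx | h)
          · rcases (hsm x).mp hx with h1 | h1
            · exact Or.inl h1
            · exact Or.inr (Or.inl h1)
          · exact Or.inr (Or.inr h)
        · rintro (h1 | h1 | h1)
          · exact Or.inl ((hsm x).mpr (Or.inl h1))
          · exact Or.inl ((hsm x).mpr (Or.inr h1))
          · exact Or.inr h1
    -- the position dictionary stays the enumeration of L
    have hkeys : pos.keys = L := by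
      show pos.items.map (·.1) = L
      rw [hpos]; exact pairs_fst L 1
    have hcont : pos.contains v = false := by
      rw [← Bool.not_eq_true, PySem.Dict.contains_iff_mem_keys, hkeys]
      exact hvnotL
    have hpos' : (pos.insert v (((L ++ [v]).length : Nat) : Int)).items = pairs 1 (L ++ [v]) := by
      rw [PySem.Dict.items_insert_of_not_contains pos _ hcont, hpos, pairs_append]
      simp
      omega
    exact ih fb' limit (L ++ [v]) k2' k3' k5' hp.1 hp.2 _ hInv' hpos'
      (by simp; omega) (by simp; omega)

-- ===== VERDICT (by name: the statement is the Claim_ definition above) =====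
theorem generate_hamming_pos_spec : Claim_equal_generate_hamming_pos := by
  unfold Claim_equal_generate_hamming_pos
  intro limit _
  unfold Spec_generate_hamming_pos
  simp only [generate_hamming_pos, generate_hamming_pos_alt]
  by_cases hl : 1 ≤ limit
  case neg =>
    have h0 : limit.toNat = 0 := by omega
    have hmax : max 1 limit = 1 := by omega
    rw [h0, hmax]
    rfl
  case pos =>
    have hmax : max 1 limit = limit := by omega
    obtain ⟨k, hk⟩ : ∃ k, limit.toNat = k + 1 := ⟨limit.toNat - 1, by omega⟩
    rw [hmax, hk]
    have hfold0 : [(2 : Int), 3, 5].foldl (bStep 1) ([], PySem.Set.ofList [1])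
        = ([2, 3, 5], [1, 2, 3, 5]) := rfl
    have hB1 : bLoop limit (k + 1) [1] (PySem.Set.ofList [1]) []
        = bLoop limit k [2, 3, 5] [1, 2, 3, 5] [1] := by
      have e : bLoop limit (k + 1) [1] (PySem.Set.ofList [1]) []
          = if ((([] : List Int).length : Int)) < limit then
              bLoop limit k ([(2 : Int), 3, 5].foldl (bStep 1) ([], PySem.Set.ofList [1])).1
                ([(2 : Int), 3, 5].foldl (bStep 1) ([], PySem.Set.ofList [1])).2 ([] ++ [1])
            else [] := rfl
      rw [e, if_pos (by simp; omega), hfold0]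
      rfl
    rw [hB1]
    have hInv0 : JInv [1] 0 0 0 [2, 3, 5] [1, 2, 3, 5] := by
      refine ⟨by simp, by simp, by norm_num, ?_, ?_, ?_, ?_, by decide, ?_, ?_⟩
      · intro x hx; simp at hx; exact Or.inl hx
      · exact ⟨by decide, by decide, fun j hj => absurd hj (Nat.not_lt_zero j)⟩
      · exact ⟨by decide, by decide, fun j hj => absurd hj (Nat.not_lt_zero j)⟩
      · exact ⟨by decide, by decide, fun j hj => absurd hj (Nat.not_lt_zero j)⟩
      · intro x; simp [Mult]; omega
      · intro x; simp [Mult]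
    obtain ⟨hEq, hNd⟩ := mainSim (k + 1) k limit [1] 0 0 0 [2, 3, 5] [1, 2, 3, 5]
      (PySem.Dict.empty.insert 1 1) hInv0 rfl (by simp; omega) (by simp; omega)
    rw [dictOf_items _ (List.Pairwise.imp (fun h => ne_of_lt h) hNd)]
    exact hEq
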